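-- pv_equiv track=rewrite | github.com/ArjunHaldiya/CodeAssist | myscript.py | complex_fn
-- ===== SOURCE A (Python) =====
-- def complex_fn(x):
--     total = 0
--     for i in range(5):
--         if x > i:
--             if i % 2 == 0:
--                 total += i
--             else:
--                 if x - i > 2:
--                     total += x*i
--                 else:
--                     total -= i
--     return total
-- ===== SOURCE B (Python) =====
-- def complex_fn(x):
--     # closed form of the unrolled 5-step loop, by thresholds on x
--     if x <= 1:
--         return 0
--     if x == 2:
--         return -1
--     if x == 3:
--         return 1
--     if x == 4:
--         return x - 1
--     if x == 5:
--         return x + 3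
--     return 4 * x + 6
-- ===== Notes on version B (the rewrite author's own statement) =====
-- stated objective: simpler
-- what changed: Replaces the 5-iteration accumulating loop with a direct closed-form piecewise formula over thresholds of x.
import Mathlib
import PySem

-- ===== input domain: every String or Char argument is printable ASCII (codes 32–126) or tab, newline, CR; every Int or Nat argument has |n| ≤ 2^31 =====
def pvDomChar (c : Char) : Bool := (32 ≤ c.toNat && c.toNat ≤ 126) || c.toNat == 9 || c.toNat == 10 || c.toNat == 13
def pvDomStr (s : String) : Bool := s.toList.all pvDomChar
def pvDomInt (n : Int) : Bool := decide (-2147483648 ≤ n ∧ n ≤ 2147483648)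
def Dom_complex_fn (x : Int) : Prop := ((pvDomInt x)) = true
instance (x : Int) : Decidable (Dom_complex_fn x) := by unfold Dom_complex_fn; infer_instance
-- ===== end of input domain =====

-- B replaces the 5-iteration accumulating loop with a closed-form piecewise formula (simpler).


-- ===== PORT A =====
-- literal transliteration: fold the loop body over range(5)
def complex_fn (x : Int) : Int :=
  (PySem.List.pyRange 0 5 1).foldl
    (fun total i =>
      if x > i then
        if PySem.Int.mod i 2 = 0 then
          total + i
        else
          if x - i > 2 then total + x * i else total - i
      else total) 0

-- ===== PORT B =====
def complex_fn_alt (x : Int) : Int :=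
  if x ≤ 1 then 0
  else if x = 2 then -1
  else if x = 3 then 1
  else if x = 4 then x - 1
  else if x = 5 then x + 3
  else 4 * x + 6

-- ===== PRECONDITION & SPEC =====
def Spec_complex_fn (x : Int) (out : Int) : Prop := out = complex_fn_alt x
instance (x : Int) (out : Int) : Decidable (Spec_complex_fn x out) := by unfold Spec_complex_fn; infer_instance

-- ===== CLAIM (what is proved, stated in full; the proofs are below) =====
def Claim_equal_complex_fn : Prop := ∀ (x : Int), Dom_complex_fn x → Spec_complex_fn x (complex_fn x)

-- ===== LEMMAS AND PROOFS =====

-- ===== VERDICT (by name: the statement is the Claim_ definition above) =====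
set_option maxHeartbeats 2000000 in
theorem complex_fn_spec : Claim_equal_complex_fn := by
  intro x _
  unfold Spec_complex_fn complex_fn complex_fn_alt
  have h5 : PySem.List.pyRange 0 5 1 = [0,1,2,3,4] := by decide
  rw [h5]
  simp only [List.foldl,
    show PySem.Int.mod (0:Int) 2 = 0 from by decide,
    show PySem.Int.mod (1:Int) 2 = 1 from by decide,
    show PySem.Int.mod (2:Int) 2 = 0 from by decide,
    show PySem.Int.mod (3:Int) 2 = 1 from by decide,
    show PySem.Int.mod (4:Int) 2 = 0 from by decide]
  norm_num
  split_ifs <;> omega
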